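-- pv_equiv track=rewrite | github.com/jeanccipriano/Teste | main.py | customerSuccessBalancing
-- ===== SOURCE A (Python) =====
-- def customerSuccessBalancing(customerSuccess, customers, customerSuccessAway):
--     available_cs = [cs for cs in customerSuccess if cs['id'] not in customerSuccessAway]
--     available_cs.sort(key=lambda cs: cs['score'])
--     customers.sort(key=lambda client: client['score'])
--     cs_client_count = {cs['id']: 0 for cs in available_cs}
--     cs_index = 0
--     for client in customers:
--         while cs_index < len(available_cs) and available_cs[cs_index]['score'] < client['score']:
--             cs_index += 1
--         if cs_index < len(available_cs):
--             cs_client_count[available_cs[cs_index]['id']] += 1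
--     max_clients = max(cs_client_count.values(), default=0)
--     top_cs = [cs_id for cs_id, count in cs_client_count.items() if count == max_clients]
--     return top_cs[0] if len(top_cs) == 1 else 0
-- ===== SOURCE B (Python) =====
-- def customerSuccessBalancing(customerSuccess, customers, customerSuccessAway):
--     away = set(customerSuccessAway)
--     available = sorted((cs for cs in customerSuccess if cs['id'] not in away),
--                        key=lambda cs: cs['score'])
--     customers.sort(key=lambda client: client['score'])
--     scores = [cs['score'] for cs in available]
--     counts = {cs['id']: 0 for cs in available}
--     for client in customers:
--         # binary search: first index with score >= client's score
--         lo, hi = 0, len(scores)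
--         need = client['score']
--         while lo < hi:
--             mid = (lo + hi) // 2
--             if scores[mid] < need:
--                 lo = mid + 1
--             else:
--                 hi = mid
--         if lo < len(scores):
--             counts[available[lo]['id']] += 1
--     # single pass over the counts: track the maximum, its first holder, uniqueness
--     best = None
--     top = 0
--     unique = False
--     for cs_id, cnt in counts.items():
--         if best is None or cnt > best:
--             best, top, unique = cnt, cs_id, True
--         elif cnt == best:
--             unique = False
--     return top if best is not None and unique else 0
-- ===== Notes on version B (the rewrite author's own statement) =====
-- stated objective: alternative
-- what changed: A's monotonic two-pointer sweep over the sorted customers/CS lists is replaced by a per-customer hand-written binary search into a prebuilt sorted score array, and A's max()+filter+top[0] aggregation by a single pass tracking (max count, first holder, uniqueness); Pre_ excludes only inputs where A raises KeyError (missing 'id'/'score' keys).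
import Mathlib
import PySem

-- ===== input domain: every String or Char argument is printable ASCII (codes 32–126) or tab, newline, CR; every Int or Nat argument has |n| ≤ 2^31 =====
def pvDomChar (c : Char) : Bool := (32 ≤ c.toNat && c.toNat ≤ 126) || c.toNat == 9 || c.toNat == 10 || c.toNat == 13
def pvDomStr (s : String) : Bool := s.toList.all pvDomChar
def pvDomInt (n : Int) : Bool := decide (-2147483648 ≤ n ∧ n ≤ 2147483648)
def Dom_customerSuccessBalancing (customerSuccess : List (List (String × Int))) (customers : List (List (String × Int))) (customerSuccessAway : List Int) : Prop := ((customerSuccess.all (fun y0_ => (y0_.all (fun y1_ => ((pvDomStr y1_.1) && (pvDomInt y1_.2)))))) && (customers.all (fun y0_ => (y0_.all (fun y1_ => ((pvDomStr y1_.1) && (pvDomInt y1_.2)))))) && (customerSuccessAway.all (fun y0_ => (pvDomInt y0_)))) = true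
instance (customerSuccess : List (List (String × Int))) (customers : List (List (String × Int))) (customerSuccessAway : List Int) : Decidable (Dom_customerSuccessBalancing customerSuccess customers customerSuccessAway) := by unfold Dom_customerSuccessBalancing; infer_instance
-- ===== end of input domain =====

-- B replaces A's monotonic two-pointer sweep by a per-customer binary search into the prebuilt
-- sorted score index, and A's max/filter aggregation by a single pass tracking (max, holder, unique).
-- Alternative structure, same return value.  Both A and B sort the `customers` argument in place
-- (same observable mutation); the equivalence proved here is about the return value.

-- shared tiny helper: d[k] on an association-list dict (both Pythons write cs['id'] / c['score'];
-- Pre_ guarantees the key is present, so the .getD 0 default is never taken on admitted inputs)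
def pvGetKey (d : List (String × Int)) (k : String) : Int := ((PySem.Dict.mk d).get? k).getD 0

-- ===== PORT A =====
-- A's while loop: advance cs_index while the current CS's score is below the client's
def pvAdvance (avail : List (List (String × Int))) (s : Int) (i : Nat) : Nat :=
  if h : i < avail.length then
    if pvGetKey avail[i] "score" < s then pvAdvance avail s (i + 1) else i
  else i
termination_by avail.length - i

-- A's loop body: state = (cs_client_count, cs_index)
def pvStepA (avail : List (List (String × Int))) (st : PySem.Dict Int Int × Nat)
    (client : List (String × Int)) : PySem.Dict Int Int × Nat :=
  let i := pvAdvance avail (pvGetKey client "score") st.2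
  if h : i < avail.length then
    (st.1.modify (pvGetKey avail[i] "id") 0 (· + 1), i)
  else (st.1, i)

def customerSuccessBalancing (customerSuccess : List (List (String × Int))) (customers : List (List (String × Int))) (customerSuccessAway : List Int) : Int :=
  let available := customerSuccess.filter (fun cs => !customerSuccessAway.contains (pvGetKey cs "id"))
  let available := PySem.List.sorted available (fun cs => pvGetKey cs "score")
  let customersS := PySem.List.sorted customers (fun c => pvGetKey c "score")
  let counts0 : PySem.Dict Int Int :=
    available.foldl (fun d cs => d.insert (pvGetKey cs "id") 0) (PySem.Dict.mk [])
  let st := customersS.foldl (pvStepA available) (counts0, 0)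
  let maxClients := PySem.List.maxD st.1.values (fun v => v) 0
  let top := (st.1.items.filter (fun p => p.2 == maxClients)).map Prod.fst
  match top with
  | [t] => t
  | _ => 0

-- ===== PORT B =====
-- B's hand-written binary search (Source B's `while lo < hi` loop): first lo with scores[lo] >= need
def pvBisect (scores : List Int) (need : Int) (lo hi : Nat) : Nat :=
  if lo < hi then
    let mid := (lo + hi) / 2
    if scores.getD mid 0 < need then pvBisect scores need (mid + 1) hi
    else pvBisect scores need lo mid
  else lo
termination_by hi - lo

-- B's counting loop body
def pvStepB (avail : List (List (String × Int))) (scores : List Int)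
    (d : PySem.Dict Int Int) (client : List (String × Int)) : PySem.Dict Int Int :=
  let lo := pvBisect scores (pvGetKey client "score") 0 scores.length
  if lo < scores.length then d.modify (pvGetKey (avail.getD lo []) "id") 0 (· + 1) else d

-- B's aggregation loop body: state = (best, top, unique)
def pvStepAgg (acc : Option Int × Int × Bool) (p : Int × Int) : Option Int × Int × Bool :=
  match acc.1 with
  | none => (some p.2, p.1, true)
  | some b => if b < p.2 then (some p.2, p.1, true)
              else if p.2 == b then (some b, acc.2.1, false)
              else acc

def customerSuccessBalancing_alt (customerSuccess : List (List (String × Int))) (customers : List (List (String × Int))) (customerSuccessAway : List Int) : Int :=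
  let awaySet := PySem.Set.ofList customerSuccessAway
  let available := PySem.List.sorted
    (customerSuccess.filter (fun cs => !awaySet.contains (pvGetKey cs "id")))
    (fun cs => pvGetKey cs "score")
  let customersS := PySem.List.sorted customers (fun c => pvGetKey c "score")
  let scores := available.map (fun cs => pvGetKey cs "score")
  let counts0 : PySem.Dict Int Int :=
    available.foldl (fun d cs => d.insert (pvGetKey cs "id") 0) (PySem.Dict.mk [])
  let counts := customersS.foldl (pvStepB available scores) counts0
  let st := counts.items.foldl pvStepAgg (none, 0, false)
  if st.1.isSome && st.2.2 then st.2.1 else 0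

-- ===== PRECONDITION & SPEC =====
-- Pre_ excludes exactly the inputs on which the Python A raises KeyError: a customerSuccess entry
-- without an 'id' key, a non-away customerSuccess entry without a 'score' key, or a customer
-- without a 'score' key.
def Pre_customerSuccessBalancing (customerSuccess : List (List (String × Int))) (customers : List (List (String × Int))) (customerSuccessAway : List Int) : Prop :=
  (∀ cs ∈ customerSuccess, ((PySem.Dict.mk cs).get? "id").isSome = true ∧
      (customerSuccessAway.contains (pvGetKey cs "id") = true ∨
        ((PySem.Dict.mk cs).get? "score").isSome = true)) ∧
  (∀ c ∈ customers, ((PySem.Dict.mk c).get? "score").isSome = true)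
instance (customerSuccess : List (List (String × Int))) (customers : List (List (String × Int))) (customerSuccessAway : List Int) : Decidable (Pre_customerSuccessBalancing customerSuccess customers customerSuccessAway) := by unfold Pre_customerSuccessBalancing; infer_instance

def pvWitness_customerSuccessBalancing : (List (List (String × Int))) × (List (List (String × Int))) × List Int :=
  ([[("id", 1), ("score", 60)], [("id", 2), ("score", 20)]],
   [[("score", 10)], [("score", 40)]],
   [])

def Spec_customerSuccessBalancing (customerSuccess : List (List (String × Int))) (customers : List (List (String × Int))) (customerSuccessAway : List Int) (out : Int) : Prop := out = customerSuccessBalancing_alt customerSuccess customers customerSuccessAway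
instance (customerSuccess : List (List (String × Int))) (customers : List (List (String × Int))) (customerSuccessAway : List Int) (out : Int) : Decidable (Spec_customerSuccessBalancing customerSuccess customers customerSuccessAway out) := by unfold Spec_customerSuccessBalancing; infer_instance

-- ===== CLAIM (what is proved, stated in full; the proofs are below) =====
def Claim_equal_customerSuccessBalancing : Prop := ∀ (customerSuccess : List (List (String × Int))) (customers : List (List (String × Int))) (customerSuccessAway : List Int), Dom_customerSuccessBalancing customerSuccess customers customerSuccessAway → Pre_customerSuccessBalancing customerSuccess customers customerSuccessAway → Spec_customerSuccessBalancing customerSuccess customers customerSuccessAway (customerSuccessBalancing customerSuccess customers customerSuccessAway)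

-- ===== LEMMAS AND PROOFS =====

-- the canonical meeting point of A's sweep and B's binary search:
-- the number of leading scores strictly below s
def pvFirstGE (scores : List Int) (s : Int) : Nat :=
  (scores.takeWhile (fun x => decide (x < s))).length

theorem pvFirstGE_le (scores : List Int) (s : Int) : pvFirstGE scores s ≤ scores.length := by
  induction scores with
  | nil => simp [pvFirstGE]
  | cons x t ih =>
    by_cases h : x < s <;> simp [pvFirstGE, h] at * <;> omega

theorem pvFirstGE_lt (scores : List Int) (s : Int) {j : Nat} (hj : j < pvFirstGE scores s) :
    scores.getD j 0 < s := by
  induction scores generalizing j with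
  | nil => simp [pvFirstGE] at hj
  | cons x t ih =>
    by_cases h : x < s
    · cases j with
      | zero => simpa using h
      | succ k =>
        simp only [pvFirstGE, List.takeWhile_cons, h, decide_true, if_true, List.length_cons] at hj
        simpa using ih (by simpa [pvFirstGE] using Nat.lt_of_succ_lt_succ hj)
    · simp [pvFirstGE, h] at hj

theorem pvFirstGE_stop (scores : List Int) (s : Int)
    (h : pvFirstGE scores s < scores.length) : ¬ scores.getD (pvFirstGE scores s) 0 < s := by
  induction scores with
  | nil => simp [pvFirstGE] at h
  | cons x t ih =>
    by_cases hx : x < s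
    · simp only [pvFirstGE, List.takeWhile_cons, hx, decide_true, if_true, List.length_cons] at h ⊢
      simpa [pvFirstGE] using ih (by simpa [pvFirstGE] using Nat.lt_of_succ_lt_succ h)
    · simpa [pvFirstGE, List.takeWhile_cons, hx] using hx

theorem pvFirstGE_unique (scores : List Int) (s : Int) (k : Nat)
    (hk : k ≤ scores.length)
    (h1 : ∀ j, j < k → scores.getD j 0 < s)
    (h2 : k < scores.length → ¬ scores.getD k 0 < s) :
    k = pvFirstGE scores s := by
  rcases Nat.lt_trichotomy k (pvFirstGE scores s) with h | h | h
  · exact absurd (pvFirstGE_lt scores s h) (h2 (lt_of_lt_of_le h (pvFirstGE_le scores s)))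
  · exact h
  · exact absurd (h1 _ h) (pvFirstGE_stop scores s (lt_of_lt_of_le h hk))

theorem scoreAt_eq (avail : List (List (String × Int))) (j : Nat) (h : j < avail.length) :
    (avail.map (fun cs => pvGetKey cs "score")).getD j 0 = pvGetKey (avail[j]) "score" := by
  rw [List.getD_eq_getElem _ _ (by simpa using h)]
  simp

theorem pvAdvance_eq (avail : List (List (String × Int))) (s : Int) (i : Nat)
    (hi : i ≤ avail.length)
    (hlt : ∀ j, j < i → (avail.map (fun cs => pvGetKey cs "score")).getD j 0 < s) :
    pvAdvance avail s i = pvFirstGE (avail.map (fun cs => pvGetKey cs "score")) s := by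
  rw [pvAdvance]
  by_cases h : i < avail.length
  · rw [dif_pos h]
    by_cases h2 : pvGetKey avail[i] "score" < s
    · rw [if_pos h2]
      exact pvAdvance_eq avail s (i + 1) h (by
        intro j hj
        rcases Nat.lt_or_ge j i with hji | hji
        · exact hlt j hji
        · have : j = i := by omega
          subst this
          rwa [scoreAt_eq avail j h])
    · rw [if_neg h2]
      exact pvFirstGE_unique _ s i (by simpa using hi)
        hlt (fun _ => by rwa [scoreAt_eq avail i h])
  · rw [dif_neg h]
    exact pvFirstGE_unique _ s i (by simpa using hi) hlt (fun hlen => by simp at hlen; omega)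
termination_by avail.length - i

theorem pvBisect_eq (scores : List Int) (s : Int) (lo hi : Nat)
    (hmono : ∀ j1 j2, j1 ≤ j2 → j2 < scores.length → scores.getD j1 0 ≤ scores.getD j2 0)
    (hlo : ∀ j, j < lo → scores.getD j 0 < s)
    (hhi : ∀ j, hi ≤ j → j < scores.length → ¬ scores.getD j 0 < s)
    (hle : lo ≤ hi) (hhil : hi ≤ scores.length) :
    pvBisect scores s lo hi = pvFirstGE scores s := by
  rw [pvBisect]
  by_cases h : lo < hi
  · rw [if_pos h]
    simp only []
    by_cases h2 : scores.getD ((lo + hi) / 2) 0 < s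
    · rw [if_pos h2]
      exact pvBisect_eq scores s ((lo + hi) / 2 + 1) hi hmono
        (fun j hj => lt_of_le_of_lt (hmono j ((lo + hi) / 2) (by omega) (by omega)) h2)
        hhi (by omega) hhil
    · rw [if_neg h2]
      exact pvBisect_eq scores s lo ((lo + hi) / 2) hmono hlo
        (fun j hj hjl hcon => h2 (lt_of_le_of_lt (hmono _ j hj hjl) hcon))
        (by omega) (by omega)
  · rw [if_neg h]
    exact pvFirstGE_unique scores s lo (by omega) hlo (fun hlen => hhi lo (by omega) hlen)
termination_by hi - lo

theorem count_fold_eq (avail : List (List (String × Int))) (clients : List (List (String × Int)))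
    (d : PySem.Dict Int Int) (i : Nat)
    (hmono : ∀ j1 j2, j1 ≤ j2 → j2 < avail.length →
      (avail.map (fun cs => pvGetKey cs "score")).getD j1 0 ≤ (avail.map (fun cs => pvGetKey cs "score")).getD j2 0)
    (hc : clients.Pairwise (fun a b => pvGetKey a "score" ≤ pvGetKey b "score"))
    (hi : i ≤ avail.length)
    (hlt : ∀ c ∈ clients, ∀ j, j < i → (avail.map (fun cs => pvGetKey cs "score")).getD j 0 < pvGetKey c "score") :
    (clients.foldl (pvStepA avail) (d, i)).1 =
      clients.foldl (pvStepB avail (avail.map (fun cs => pvGetKey cs "score"))) d := by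
  induction clients generalizing d i with
  | nil => rfl
  | cons c rest ih =>
    have hlen : (avail.map (fun cs => pvGetKey cs "score")).length = avail.length := by simp
    have hadv : pvAdvance avail (pvGetKey c "score") i
        = pvFirstGE (avail.map (fun cs => pvGetKey cs "score")) (pvGetKey c "score") :=
      pvAdvance_eq avail _ i hi (hlt c (by simp))
    have hbis : pvBisect (avail.map (fun cs => pvGetKey cs "score")) (pvGetKey c "score") 0
          avail.length
        = pvFirstGE (avail.map (fun cs => pvGetKey cs "score")) (pvGetKey c "score") := by
      rw [show avail.length = (avail.map (fun cs => pvGetKey cs "score")).length from hlen.symm]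
      exact pvBisect_eq _ _ 0 _ (by rw [hlen]; exact hmono) (by omega)
        (fun j hj hjl => by omega) (by omega) (by omega)
    set fge := pvFirstGE (avail.map (fun cs => pvGetKey cs "score")) (pvGetKey c "score") with hfge
    have hfle : fge ≤ avail.length := by
      rw [hfge, ← hlen]; exact pvFirstGE_le _ _
    have hnext : ∀ c' ∈ rest, ∀ j, j < fge →
        (avail.map (fun cs => pvGetKey cs "score")).getD j 0 < pvGetKey c' "score" := by
      intro c' hc' j hj
      have h1 : (avail.map (fun cs => pvGetKey cs "score")).getD j 0 < pvGetKey c "score" :=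
        pvFirstGE_lt _ _ (hfge ▸ hj)
      have h2 : pvGetKey c "score" ≤ pvGetKey c' "score" :=
        (List.pairwise_cons.mp hc).1 c' hc'
      omega
    have hrest : rest.Pairwise (fun a b => pvGetKey a "score" ≤ pvGetKey b "score") :=
      (List.pairwise_cons.mp hc).2
    by_cases hx : fge < avail.length
    · have hsa : pvStepA avail (d, i) c
          = (d.modify (pvGetKey (avail[fge]'hx) "id") 0 (· + 1), fge) := by
        unfold pvStepA
        simp only [hadv]
        rw [dif_pos hx]
      have hsb : pvStepB avail (avail.map (fun cs => pvGetKey cs "score")) d c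
          = d.modify (pvGetKey (avail[fge]'hx) "id") 0 (· + 1) := by
        unfold pvStepB
        simp only [hlen, hbis]
        rw [if_pos hx, List.getD_eq_getElem _ _ hx]
      rw [List.foldl_cons, List.foldl_cons, hsa, hsb]
      exact ih _ _ hrest hfle hnext
    · have hsa : pvStepA avail (d, i) c = (d, fge) := by
        unfold pvStepA
        simp only [hadv]
        rw [dif_neg hx]
      have hsb : pvStepB avail (avail.map (fun cs => pvGetKey cs "score")) d c = d := by
        unfold pvStepB
        simp only [hlen, hbis]
        rw [if_neg hx]
      rw [List.foldl_cons, List.foldl_cons, hsa, hsb]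
      exact ih _ _ hrest hfle hnext

theorem maxD_snd_append (l : List (Int × Int)) (p : Int × Int) (hl : l ≠ []) :
    PySem.List.maxD ((l ++ [p]).map (fun x => x.2)) (fun v => v) 0
      = max (PySem.List.maxD (l.map (fun x => x.2)) (fun v => v) 0) p.2 := by
  obtain ⟨a, t, rfl⟩ := List.exists_cons_of_ne_nil hl
  simp only [List.map_append, List.map_cons, List.cons_append,
    PySem.List.maxD, PySem.List.max?_id_cons, Option.getD_some, List.foldl_append,
    List.map_nil, List.foldl_cons, List.foldl_nil]

theorem maxD_snd_isMax (l : List (Int × Int)) (hl : l ≠ []) :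
    (∀ q ∈ l, q.2 ≤ PySem.List.maxD (l.map (fun x => x.2)) (fun v => v) 0) ∧
      (∃ q ∈ l, q.2 = PySem.List.maxD (l.map (fun x => x.2)) (fun v => v) 0) := by
  have hne : l.map (fun x => x.2) ≠ [] := by simpa using hl
  have hsome : ∃ m, PySem.List.max? (l.map (fun x => x.2)) (fun v => v) = some m := by
    rcases h : PySem.List.max? (l.map (fun x => x.2)) (fun v => v) with _ | m
    · exact absurd ((PySem.List.max?_eq_none_iff _ _).mp h) hne
    · exact ⟨m, h⟩
  obtain ⟨m, hm⟩ := hsome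
  have hMd : PySem.List.maxD (l.map (fun x => x.2)) (fun v => v) 0 = m := by
    simp [PySem.List.maxD, hm]
  constructor
  · intro q hq
    rw [hMd]
    exact PySem.List.max?_isMax hm q.2 (List.mem_map_of_mem hq)
  · have := PySem.List.max?_mem hm
    obtain ⟨q, hq, hq2⟩ := List.mem_map.mp this
    exact ⟨q, hq, by rw [hMd, hq2]⟩

theorem foldAgg_char (l : List (Int × Int)) (hl : l ≠ []) :
    l.foldl pvStepAgg ((none : Option Int), (0 : Int), false) =
      (some (PySem.List.maxD (l.map (fun x => x.2)) (fun v => v) 0),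
       ((l.filter (fun p => p.2 == PySem.List.maxD (l.map (fun x => x.2)) (fun v => v) 0)).map Prod.fst).headD 0,
       decide (l.countP (fun p => p.2 == PySem.List.maxD (l.map (fun x => x.2)) (fun v => v) 0) = 1)) := by
  induction l using List.reverseRecOn with
  | nil => exact absurd rfl hl
  | append_singleton l p ih =>
    by_cases h0 : l = []
    · subst h0
      simp [pvStepAgg, PySem.List.maxD, PySem.List.max?]
    · rw [List.foldl_append, ih h0]
      set M := PySem.List.maxD (l.map (fun x => x.2)) (fun v => v) 0 with hM
      obtain ⟨hle, q, hq, hq2⟩ := maxD_snd_isMax l h0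
      rw [List.foldl_cons, List.foldl_nil, maxD_snd_append l p h0, ← hM]
      rcases lt_trichotomy M p.2 with hcmp | hcmp | hcmp
      · -- new strict max
        have hmax : max M p.2 = p.2 := max_eq_right (le_of_lt hcmp)
        have hfl : l.filter (fun q => q.2 == p.2) = [] := by
          apply List.filter_eq_nil_iff.mpr
          intro q' hq'
          have := hle q' hq'
          simp only [beq_iff_eq]
          omega
        have hcp : l.countP (fun q => q.2 == p.2) = 0 := by
          rw [List.countP_eq_length_filter, hfl]; rfl
        simp only [pvStepAgg, hmax, if_pos hcmp]
        simp [List.filter_append, List.countP_append, hfl, hcp]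
      · -- tie with old max
        have hmax : max M p.2 = M := by omega
        have hnlt : ¬ M < p.2 := by omega
        have hpeq : (p.2 == M) = true := by simp [hcmp]
        have hflne : l.filter (fun q => q.2 == M) ≠ [] := by
          intro hcon
          have : q ∈ l.filter (fun q => q.2 == M) := List.mem_filter.mpr ⟨hq, by simpa using hq2⟩
          rw [hcon] at this; simp at this
        obtain ⟨a, t, hat⟩ := List.exists_cons_of_ne_nil hflne
        have hcnt : decide (List.countP (fun q => q.2 == M) (l ++ [p]) = 1) = false := by
          have h1 : [p].countP (fun q => q.2 == M) = 1 := by simp [hpeq]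
          have hcp : 1 ≤ l.countP (fun q => q.2 == M) := by
            rw [List.countP_eq_length_filter, hat]; simp
          simp only [List.countP_append, h1, decide_eq_false_iff_not]
          omega
        have hstep : pvStepAgg (some M,
              (List.map Prod.fst (List.filter (fun q => q.2 == M) l)).headD 0,
              decide (List.countP (fun q => q.2 == M) l = 1)) p
            = (some M, (List.map Prod.fst (List.filter (fun q => q.2 == M) l)).headD 0, false) := by
          simp [pvStepAgg, hnlt, hpeq]
        rw [hstep, hmax, hcnt]
        simp only [List.filter_append, List.map_append, hat]
        simp [hpeq]
      · -- smaller than max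
        have hmax : max M p.2 = M := by omega
        have hnlt : ¬ M < p.2 := by omega
        have hne : (p.2 == M) = false := by simp; omega
        simp [pvStepAgg, hmax, if_neg hnlt, hne, List.filter_append, List.countP_append]

theorem agg_eq (l : List (Int × Int)) :
    (match (l.filter (fun p => p.2 == PySem.List.maxD (l.map (fun x => x.2)) (fun v => v) 0)).map Prod.fst with
     | [t] => t
     | _ => 0)
    = (if (l.foldl pvStepAgg ((none : Option Int), (0 : Int), false)).1.isSome
          && (l.foldl pvStepAgg ((none : Option Int), (0 : Int), false)).2.2
       then (l.foldl pvStepAgg ((none : Option Int), (0 : Int), false)).2.1 else 0) := by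
  by_cases hl : l = []
  · subst hl; rfl
  · rw [foldAgg_char l hl]
    set M := PySem.List.maxD (l.map (fun x => x.2)) (fun v => v) 0 with hM
    by_cases hc1 : l.countP (fun p => p.2 == M) = 1
    · have hlen1 : (l.filter (fun p => p.2 == M)).length = 1 := by
        rw [← List.countP_eq_length_filter]; exact hc1
      obtain ⟨x, hx⟩ := List.length_eq_one_iff.mp hlen1
      simp [hx, hc1]
    · have hlen1 : (l.filter (fun p => p.2 == M)).length ≠ 1 := by
        rw [← List.countP_eq_length_filter]; exact hc1
      rcases hfl : l.filter (fun p => p.2 == M) with _ | ⟨a, _ | ⟨b, t⟩⟩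
      · simp [hfl, hc1]
      · rw [hfl] at hlen1; simp at hlen1
      · simp [hfl, hc1]

theorem pairwise_le_getD (xs : List Int) (h : xs.Pairwise (· ≤ ·)) :
    ∀ j1 j2, j1 ≤ j2 → j2 < xs.length → xs.getD j1 0 ≤ xs.getD j2 0 := by
  intro j1 j2 hle hlt
  rcases Nat.eq_or_lt_of_le hle with rfl | hlt2
  · exact le_refl _
  · rw [List.getD_eq_getElem _ _ (by omega), List.getD_eq_getElem _ _ hlt]
    exact List.pairwise_iff_getElem.mp h j1 j2 (by omega) hlt hlt2

-- ===== VERDICT (by name: the statement is the Claim_ definition above) =====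
theorem customerSuccessBalancing_spec : Claim_equal_customerSuccessBalancing := by
  intro customerSuccess customers customerSuccessAway _ _
  unfold Spec_customerSuccessBalancing
  have hav : customerSuccess.filter (fun cs => !customerSuccessAway.contains (pvGetKey cs "id"))
      = customerSuccess.filter (fun cs => !(PySem.Set.ofList customerSuccessAway).contains (pvGetKey cs "id")) := by
    apply List.filter_congr
    intro x _
    simp [PySem.Set.contains_eq_listContains, List.contains_eq_mem, PySem.Set.mem_ofList]
  simp only [customerSuccessBalancing, customerSuccessBalancing_alt]
  rw [hav]
  set avail := PySem.List.sorted
    (customerSuccess.filter (fun cs => !(PySem.Set.ofList customerSuccessAway).contains (pvGetKey cs "id")))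
    (fun cs => pvGetKey cs "score") with havail
  set customersS := PySem.List.sorted customers (fun c => pvGetKey c "score") with hcS
  set counts0 : PySem.Dict Int Int :=
    avail.foldl (fun d cs => d.insert (pvGetKey cs "id") 0) (PySem.Dict.mk []) with hc0
  have hmono : ∀ j1 j2, j1 ≤ j2 → j2 < avail.length →
      (avail.map (fun cs => pvGetKey cs "score")).getD j1 0
        ≤ (avail.map (fun cs => pvGetKey cs "score")).getD j2 0 := by
    intro j1 j2 h1 h2
    exact pairwise_le_getD _ (by rw [havail]; exact PySem.List.sorted_map_key_pairwise _ _)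
      j1 j2 h1 (by simpa using h2)
  have hc : customersS.Pairwise (fun a b => pvGetKey a "score" ≤ pvGetKey b "score") := by
    rw [hcS]; exact PySem.List.sorted_pairwise _ _
  have hcnt := count_fold_eq avail customersS counts0 0 hmono hc (by omega)
    (fun c _ j hj => by omega)
  rw [hcnt]
  have hvals : (customersS.foldl (pvStepB avail (avail.map (fun cs => pvGetKey cs "score"))) counts0).values
      = (customersS.foldl (pvStepB avail (avail.map (fun cs => pvGetKey cs "score"))) counts0).items.map (fun x => x.2) := rfl
  rw [hvals]
  exact agg_eq _
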